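-- pv_equiv track=rewrite | github.com/leeminseok11/ssafy_0313 | python_과제/01_26/ws_5_c.py | restructure_word
-- ===== SOURCE A (Python) =====
-- def restructure_word(word, arr):
--     for i in word:
--         if i.isdecimal():
--             for _ in range(int(i)):
--                 if arr:
--                     arr.pop()
--         else:
--             if i in arr:
--                 arr.remove(i)
--     return arr
-- ===== SOURCE B (Python) =====
-- def restructure_word(word, arr):
--     # Different strategy: keep the live elements as the prefix arr[:end] instead of
--     # shrinking the list per instruction — a digit instruction just moves the end
--     # pointer, a removal locates the first occurrence with index() and deletes it if it
--     # falls inside the live prefix, and chars once found absent from the live prefix are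
--     # memoised in `gone` (the live prefix only shrinks). Mutates arr in place like A.
--     end = len(arr)
--     gone = set()
--     for ch in word:
--         if '0' <= ch <= '9':
--             end = max(end - (ord(ch) - 48), 0)
--         elif ch not in gone:
--             try:
--                 j = arr.index(ch)
--             except ValueError:
--                 j = end
--             if j < end:
--                 del arr[j]
--                 end -= 1
--             else:
--                 gone.add(ch)
--     del arr[end:]
--     return arr
-- ===== Notes on version B (the rewrite author's own statement) =====
-- stated objective: faster
-- what changed: B never pops: it tracks the live elements as the prefix arr[:end] of the original list, so a digit instruction is O(1) pointer arithmetic instead of a pop loop, a removal is a single index() lookup tested against the pointer instead of a membership test plus remove, and a char once found absent from the live prefix (which only shrinks) is memoised in a set so every later occurrence is skipped in O(1).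
import Mathlib
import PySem

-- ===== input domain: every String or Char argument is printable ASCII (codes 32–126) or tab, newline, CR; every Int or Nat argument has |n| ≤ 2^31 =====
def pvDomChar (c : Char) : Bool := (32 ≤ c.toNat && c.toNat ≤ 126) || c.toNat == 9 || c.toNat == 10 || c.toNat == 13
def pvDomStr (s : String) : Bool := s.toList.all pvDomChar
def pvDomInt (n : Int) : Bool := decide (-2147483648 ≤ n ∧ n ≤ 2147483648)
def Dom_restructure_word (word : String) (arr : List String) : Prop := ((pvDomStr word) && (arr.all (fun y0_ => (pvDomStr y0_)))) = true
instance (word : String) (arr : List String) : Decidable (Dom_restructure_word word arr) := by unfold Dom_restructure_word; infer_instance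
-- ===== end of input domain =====

-- Both A and B mutate `arr` in place to the same final contents; the equivalence proved
-- here is about the return value. B is an alternative algorithm: it keeps the live
-- elements as a prefix tracked by an end pointer — a digit instruction moves the
-- pointer instead of popping, a removal is an index() lookup tested against the
-- pointer, and chars once found absent from the live prefix are memoised in a set.

-- ===== PORT A =====
-- one step of A's `for i in word` loop, state = arr
def rwStepA (arr : List String) (i : Char) : List String :=
  if PySem.Chars.isdigit i then
    -- `i.isdecimal()`: on the ASCII domain this coincides with str.isdigit
    (PySem.List.pyRange 0 ((PySem.Int.ofStr? (String.ofList [i])).getD 0) 1).foldl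
      -- `int(i)`: i is a decimal digit here, so ofStr? is `some`; `.getD 0` is unreachable
      (fun arr _ =>
        if arr ≠ [] then ((PySem.List.pop? arr (-1)).map Prod.snd).getD arr else arr) arr
      -- `if arr: arr.pop()` — pop? is `some` on the nonempty list, `.getD arr` unreachable
  else
    if String.ofList [i] ∈ arr then
      (PySem.List.remove? arr (String.ofList [i])).getD arr
    else arr

def restructure_word (word : String) (arr : List String) : List String :=
  word.toList.foldl rwStepA arr

-- ===== PORT B =====
-- one step of B's `for ch in word` loop, state = (arr, end, gone)
def rwStepB (st : List String × Int × PySem.Set Char) (ch : Char) :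
    List String × Int × PySem.Set Char :=
  if '0' ≤ ch ∧ ch ≤ '9' then
    (st.1, max (st.2.1 - ((ch.toNat : Int) - 48)) 0, st.2.2)
  else if PySem.Set.contains st.2.2 ch then st
  else
    let j : Int :=
      match PySem.List.index? st.1 (String.ofList [ch]) with
      | none => st.2.1        -- the `except ValueError: j = end` branch
      | some j => (j : Int)
    if j < st.2.1 then (st.1.eraseIdx j.toNat, st.2.1 - 1, st.2.2)
      -- del arr[j] at an in-range index
    else (st.1, st.2.1, PySem.Set.add st.2.2 ch)

def restructure_word_alt (word : String) (arr : List String) : List String :=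
  let p := word.toList.foldl rwStepB (arr, (arr.length : Int), PySem.Set.empty)
  PySem.List.slice p.1 none (some p.2.1)   -- `del arr[end:]` leaves arr[:end]

-- ===== PRECONDITION & SPEC =====
def Spec_restructure_word (word : String) (arr : List String) (out : List String) : Prop := out = restructure_word_alt word arr
instance (word : String) (arr : List String) (out : List String) : Decidable (Spec_restructure_word word arr out) := by unfold Spec_restructure_word; infer_instance

-- ===== CLAIM (what is proved, stated in full; the proofs are below) =====
def Claim_equal_restructure_word : Prop := ∀ (word : String) (arr : List String), Dom_restructure_word word arr → Spec_restructure_word word arr (restructure_word word arr)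

-- ===== LEMMAS AND PROOFS =====

theorem char_eq_of_toNat {c d : Char} (h : c.toNat = d.toNat) : c = d := by
  apply Char.ext; exact UInt32.toNat_inj.mp h

theorem digit_ofStr (c : Char) (h : PySem.Chars.isdigit c = true) :
    PySem.Int.ofStr? (String.ofList [c]) = some ((c.toNat : Int) - 48) := by
  simp only [PySem.Chars.isdigit, Bool.and_eq_true, decide_eq_true_eq, Char.le_def,
    UInt32.le_iff_toNat_le] at h
  have h0 : (48:Nat) ≤ c.toNat := h.1
  have h9 : c.toNat ≤ 57 := h.2
  interval_cases hh : c.toNat <;>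
    [ (have : c = '0' := char_eq_of_toNat (by rw [hh]; decide));
      (have : c = '1' := char_eq_of_toNat (by rw [hh]; decide));
      (have : c = '2' := char_eq_of_toNat (by rw [hh]; decide));
      (have : c = '3' := char_eq_of_toNat (by rw [hh]; decide));
      (have : c = '4' := char_eq_of_toNat (by rw [hh]; decide));
      (have : c = '5' := char_eq_of_toNat (by rw [hh]; decide));
      (have : c = '6' := char_eq_of_toNat (by rw [hh]; decide));
      (have : c = '7' := char_eq_of_toNat (by rw [hh]; decide));
      (have : c = '8' := char_eq_of_toNat (by rw [hh]; decide));
      (have : c = '9' := char_eq_of_toNat (by rw [hh]; decide))] <;>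
    subst this <;> decide

-- a foldl that ignores the elements is an iterate
theorem foldl_ignore {α β : Type} (f : α → α) (L : List β) (x : α) :
    L.foldl (fun a _ => f a) x = f^[L.length] x := by
  induction L generalizing x with
  | nil => rfl
  | cons b t ih => simp [List.foldl_cons, ih, Function.iterate_succ_apply]

-- A's guarded pop is dropLast
theorem guardedPop_dropLast (m : List String) :
    ((if m ≠ [] then ((PySem.List.pop? m (-1)).map Prod.snd).getD m else m) : List String)
      = m.dropLast := by
  induction m using List.reverseRecOn with
  | nil => simp
  | append_singleton xs a _ =>
      have hne : xs ++ [a] ≠ [] := by simp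
      simp [hne, PySem.List.pop?_last]

-- k guarded pops truncate to the first (length - k) elements
theorem guardedPop_iterate (k : Nat) (m : List String) :
    ((fun a => if a ≠ [] then ((PySem.List.pop? a (-1)).map Prod.snd).getD a else a)^[k] m)
      = m.take (m.length - k) := by
  induction k with
  | zero => simp
  | succ k ih =>
      rw [Function.iterate_succ_apply', ih, guardedPop_dropLast,
          List.dropLast_eq_take, List.take_take, List.length_take]
      congr 1
      omega

-- a first occurrence reported inside the live prefix really is the first in the prefix
theorem index?_first {live : List String} {s : String} {j : Nat}
    (h : PySem.List.index? live s = some j) :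
    j < live.length ∧ live.eraseIdx j = live.erase s := by
  obtain ⟨hk, hget, -⟩ := PySem.List.getElem_of_index?_eq_some h
  refine ⟨hk, ?_⟩
  rw [PySem.List.index?_eq_idxOf?] at h
  have hidx : live.idxOf s = j := by
    rw [List.idxOf_eq_getD_idxOf?, h]; rfl
  exact (List.erase_eq_eraseIdx_of_idxOf hidx).symm

-- the main invariant: B's fold on (live ++ dead, |live|, gone) tracks A's fold on live,
-- provided every memoised char is indeed absent from the live prefix
theorem main_inv (l : List Char) (live dead : List String) (gone : PySem.Set Char)
    (hg : ∀ c ∈ gone, String.ofList [c] ∉ live) :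
    ∃ (dead₂ : List String) (gone₂ : PySem.Set Char),
      l.foldl rwStepB (live ++ dead, (live.length : Int), gone)
        = ((l.foldl rwStepA live) ++ dead₂, ((l.foldl rwStepA live).length : Int), gone₂) := by
  induction l generalizing live dead gone with
  | nil => exact ⟨dead, gone, by simp⟩
  | cons ch l ih =>
      simp only [List.foldl_cons]
      have hgone_mem : ∀ (g : PySem.Set Char) (c : Char), PySem.Set.contains g c = true → c ∈ g := by
        intro g c hc
        simpa [PySem.Set.contains] using hc
      by_cases hd : PySem.Chars.isdigit ch = true
      · -- digit instruction
        have hd' : '0' ≤ ch ∧ ch ≤ '9' := by simpa [PySem.Chars.isdigit] using hd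
        have hk : (0:Int) ≤ (ch.toNat : Int) - 48 := by
          have h := hd'.1
          simp only [Char.le_def, UInt32.le_iff_toNat_le] at h
          have h48 : ('0').val.toNat = 48 := by decide
          have hceq : ch.toNat = ch.val.toNat := rfl
          omega
        have hA : rwStepA live ch
            = live.take (live.length - ((ch.toNat : Int) - 48).toNat) := by
          simp only [rwStepA, if_pos hd]
          rw [digit_ofStr ch hd]
          simp only [Option.getD_some]
          rw [foldl_ignore, PySem.List.length_pyRange_one, guardedPop_iterate]
          congr 1
          omega
        have hB : rwStepB (live ++ dead, (live.length : Int), gone) ch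
            = (live ++ dead,
               ((live.take (live.length - ((ch.toNat : Int) - 48).toNat)).length : Int), gone) := by
          simp only [rwStepB, if_pos hd', Prod.mk.injEq, true_and, and_true]
          simp only [List.length_take]
          omega
        rw [hA, hB]
        have hsplit : live ++ dead
            = live.take (live.length - ((ch.toNat : Int) - 48).toNat)
              ++ (live.drop (live.length - ((ch.toNat : Int) - 48).toNat) ++ dead) := by
          rw [← List.append_assoc, List.take_append_drop]
        rw [hsplit]
        exact ih _ _ _ (fun c hc hmem => hg c hc (List.mem_of_mem_take hmem))
      · -- removal instruction
        have hd' : ¬ ('0' ≤ ch ∧ ch ≤ '9') := by simpa [PySem.Chars.isdigit] using hd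
        by_cases hgone : PySem.Set.contains gone ch = true
        · -- memoised: B skips, and by the invariant A's membership test fails too
          have hnl : String.ofList [ch] ∉ live := hg ch (hgone_mem gone ch hgone)
          have hA : rwStepA live ch = live := by
            simp only [rwStepA, if_neg hd]
            rw [if_neg hnl]
          have hB : rwStepB (live ++ dead, (live.length : Int), gone) ch
              = (live ++ dead, (live.length : Int), gone) := by
            simp only [rwStepB, if_neg hd', hgone, if_true]
          rw [hA, hB]
          exact ih _ _ _ hg
        by_cases hmem : String.ofList [ch] ∈ live
        · obtain ⟨j, hj⟩ : ∃ j, PySem.List.index? live (String.ofList [ch]) = some j := by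
            rw [PySem.List.index?_eq_idxOf?]
            rcases hh : List.idxOf? (String.ofList [ch]) live with _ | j
            · exact absurd (List.idxOf?_eq_none_iff.mp hh) (not_not.mpr hmem)
            · exact ⟨j, rfl⟩
          obtain ⟨hjlt, herase⟩ := index?_first hj
          have hA : rwStepA live ch = live.erase (String.ofList [ch]) := by
            simp only [rwStepA, if_neg hd]
            rw [if_pos hmem, PySem.List.remove?_eq_some_erase _ _ hmem]
            rfl
          have hB : rwStepB (live ++ dead, (live.length : Int), gone) ch
              = (live.erase (String.ofList [ch]) ++ dead,
                 ((live.erase (String.ofList [ch])).length : Int), gone) := by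
            simp only [rwStepB, if_neg hd', hgone, if_false, Bool.false_eq_true]
            rw [PySem.List.index?_append_of_mem dead hmem, hj]
            simp only
            rw [if_pos (by exact_mod_cast hjlt)]
            simp only [Prod.mk.injEq, Int.toNat_natCast, and_true]
            constructor
            · rw [List.eraseIdx_append, if_pos hjlt, herase]
            · rw [List.length_erase_of_mem hmem]
              have : 1 ≤ live.length := List.length_pos_of_mem hmem
              omega
          rw [hA, hB]
          exact ih _ _ _ (fun c hc hm => hg c hc (List.mem_of_mem_erase hm))
        · have hA : rwStepA live ch = live := by
            simp only [rwStepA, if_neg hd]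
            rw [if_neg hmem]
          have hg' : ∀ c ∈ PySem.Set.add gone ch, String.ofList [c] ∉ live := by
            intro c hc
            rcases (PySem.Set.mem_add _ _ _).mp hc with h | h
            · exact hg c h
            · subst h; exact hmem
          have hB : rwStepB (live ++ dead, (live.length : Int), gone) ch
              = (live ++ dead, (live.length : Int), PySem.Set.add gone ch) := by
            simp only [rwStepB, if_neg hd', hgone, if_false, Bool.false_eq_true]
            rcases hh : PySem.List.index? (live ++ dead) (String.ofList [ch]) with _ | j
            · simp
            · obtain ⟨hk, hget, -⟩ := PySem.List.getElem_of_index?_eq_some hh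
              have hge : ¬ ((j : Int) < (live.length : Int)) := by
                by_contra hlt
                have hjl : j < live.length := by exact_mod_cast hlt
                have hgl : live[j] = String.ofList [ch] := by
                  rw [← List.getElem_append_left (bs := dead) hjl]
                  exact hget
                exact hmem (hgl ▸ List.getElem_mem hjl)
              simp [hge]
          rw [hA, hB]
          exact ih _ _ _ hg'

-- ===== VERDICT (by name: the statement is the Claim_ definition above) =====
theorem restructure_word_spec : Claim_equal_restructure_word := by
  intro word arr _
  unfold Spec_restructure_word restructure_word restructure_word_alt
  obtain ⟨dead₂, gone₂, h⟩ := main_inv word.toList arr [] PySem.Set.empty (by intro c hc; simp [PySem.Set.empty] at hc)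
  rw [List.append_nil] at h
  rw [h]
  rw [PySem.List.slice_to_natCast, List.take_left]
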